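-- pv_equiv track=rewrite | github.com/lavr/python-emails | emails/packages/dkim.py | asn1_length
-- ===== SOURCE A (Python) =====
-- def asn1_length(n):
--     """Return a string representing a field length in ASN.1 format."""
--     assert n >= 0
--     if n < 0x7f:
--         return chr(n)
--     r = ""
--     while n > 0:
--         r = chr(n & 0xff) + r
--         n >>= 8
--     return r
-- ===== SOURCE B (Python) =====
-- def asn1_length(n):
--     """Return a string representing a field length in ASN.1 format."""
--     assert n >= 0
--     if n < 0x7f:
--         return chr(n)
--     length = (n.bit_length() + 7) // 8
--     return n.to_bytes(length, 'big').decode('latin-1')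
-- ===== Notes on version B (the rewrite author's own statement) =====
-- stated objective: idiomatic
-- what changed: Replaces the iterative shift/mask string-prepend loop by computing the byte count from bit_length and emitting all bytes at once with int.to_bytes(...,'big').decode('latin-1').
import Mathlib
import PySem

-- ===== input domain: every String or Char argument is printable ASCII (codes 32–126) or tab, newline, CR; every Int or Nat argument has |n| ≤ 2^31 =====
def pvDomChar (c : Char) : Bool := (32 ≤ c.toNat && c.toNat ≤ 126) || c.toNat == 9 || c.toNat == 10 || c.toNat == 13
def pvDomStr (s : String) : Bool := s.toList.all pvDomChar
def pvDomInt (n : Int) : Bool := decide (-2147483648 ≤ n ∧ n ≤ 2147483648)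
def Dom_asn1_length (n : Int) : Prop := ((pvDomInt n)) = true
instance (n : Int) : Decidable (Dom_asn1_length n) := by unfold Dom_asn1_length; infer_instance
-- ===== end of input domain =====

-- B replaces A's shift/mask accumulation loop by an up-front byte-count from bit_length plus a single big-endian encode (idiomatic; value-equal).

-- ===== PORT A =====
-- A's while loop: r = chr(n & 0xff) + r; n >>= 8   (for n ≥ 0, n & 0xff = n % 256 and n >> 8 = n / 256)
def asn1Loop (m : Nat) (r : List Char) : List Char :=
  if h : 0 < m then asn1Loop (m / 256) (Char.ofNat (m % 256) :: r) else r
termination_by m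
decreasing_by exact Nat.div_lt_self h (by norm_num)

def asn1_length (n : Int) : String :=
  if n < 0x7f then String.mk [Char.ofNat n.toNat]
  else String.mk (asn1Loop n.toNat [])

-- ===== PORT B =====
-- n.to_bytes(length, 'big').decode('latin-1'): exactly `length` chars, big-endian base-256 digits
def toBytesBE : Nat → Nat → List Char
  | 0, _ => []
  | k + 1, m => toBytesBE k (m / 256) ++ [Char.ofNat (m % 256)]

def asn1_length_alt (n : Int) : String :=
  if n < 0x7f then String.mk [Char.ofNat n.toNat]
  else String.mk (toBytesBE ((PySem.Int.bitLength n + 7) / 8) n.toNat)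

-- ===== PRECONDITION & SPEC =====
-- Pre_ excludes n < 0, where A's `assert n >= 0` raises AssertionError.
def Pre_asn1_length (n : Int) : Prop := 0 ≤ n
instance (n : Int) : Decidable (Pre_asn1_length n) := by unfold Pre_asn1_length; infer_instance
def pvWitness_asn1_length : Int := (200)

def Spec_asn1_length (n : Int) (out : String) : Prop := out = asn1_length_alt n
instance (n : Int) (out : String) : Decidable (Spec_asn1_length n out) := by unfold Spec_asn1_length; infer_instance

-- ===== CLAIM (what is proved, stated in full; the proofs are below) =====
def Claim_equal_asn1_length : Prop := ∀ (n : Int), Dom_asn1_length n → Pre_asn1_length n → Spec_asn1_length n (asn1_length n)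

-- ===== LEMMAS AND PROOFS =====

-- bitLength is the unique k ≥ 1 with 2^(k-1) ≤ m < 2^k
lemma bitLength_unique (m k : Nat) (h1 : 2 ^ (k - 1) ≤ m) (h2 : m < 2 ^ k) (hk : 1 ≤ k) :
    PySem.Int.bitLength (m : Int) = k := by
  have hm : 0 < m := lt_of_lt_of_le (Nat.two_pow_pos _) h1
  have hne : (m : Int) ≠ 0 := by exact_mod_cast hm.ne'
  have ha : ((m : Int)).natAbs = m := Int.natAbs_natCast m
  have hu := PySem.Int.lt_two_pow_bitLength (m : Int)
  have hl := PySem.Int.two_pow_bitLength_le (m : Int) hne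
  rw [ha] at hu hl
  set L := PySem.Int.bitLength (m : Int) with hL
  have hL1 : 1 ≤ L := by
    by_contra h
    have : L = 0 := by omega
    rw [this] at hu; omega
  -- 2^(L-1) ≤ m < 2^k  →  L-1 < k ; 2^(k-1) ≤ m < 2^L → k-1 < L
  have c1 : L - 1 < k := by
    have := lt_of_le_of_lt hl h2
    exact (Nat.pow_lt_pow_iff_right (by norm_num : 1 < 2)).mp this
  have c2 : k - 1 < L := by
    have := lt_of_le_of_lt h1 hu
    exact (Nat.pow_lt_pow_iff_right (by norm_num : 1 < 2)).mp this
  omega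

lemma bitLength_small (m : Nat) (h0 : 0 < m) (h : m < 256) :
    (PySem.Int.bitLength (m : Int) + 7) / 8 = 1 := by
  have hne : (m : Int) ≠ 0 := by exact_mod_cast h0.ne'
  have hu := PySem.Int.lt_two_pow_bitLength (m : Int)
  have hl := PySem.Int.two_pow_bitLength_le (m : Int) hne
  rw [Int.natAbs_natCast] at hu hl
  set L := PySem.Int.bitLength (m : Int) with hL
  have hL1 : 1 ≤ L := by
    by_contra hc
    have : L = 0 := by omega
    rw [this] at hu; omega
  have hle : L ≤ 8 := by
    by_contra hc
    have h8 : 8 ≤ L - 1 := by omega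
    have : (2 : Nat) ^ 8 ≤ 2 ^ (L - 1) := Nat.pow_le_pow_right (by norm_num) h8
    omega
  omega

lemma bitLength_step (m : Nat) (h : 256 ≤ m) :
    PySem.Int.bitLength (m : Int) = PySem.Int.bitLength ((m / 256 : Nat) : Int) + 8 := by
  have h1 : 0 < m / 256 := Nat.div_pos h (by norm_num)
  have hne : ((m / 256 : Nat) : Int) ≠ 0 := by exact_mod_cast h1.ne'
  have hu := PySem.Int.lt_two_pow_bitLength ((m / 256 : Nat) : Int)
  have hl := PySem.Int.two_pow_bitLength_le ((m / 256 : Nat) : Int) hne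
  rw [Int.natAbs_natCast] at hu hl
  set L := PySem.Int.bitLength ((m / 256 : Nat) : Int) with hL
  have hL1 : 1 ≤ L := by
    by_contra hc
    have : L = 0 := by omega
    rw [this] at hu; omega
  apply bitLength_unique m (L + 8) ?_ ?_ (by omega)
  · -- 2^(L+8-1) ≤ m  from 2^(L-1) ≤ m/256
    have : 2 ^ (L - 1) * 256 ≤ m := (Nat.le_div_iff_mul_le (by norm_num)).mp hl
    have he : 2 ^ (L - 1) * 256 = 2 ^ (L + 8 - 1) := by
      have : L - 1 + 8 = L + 8 - 1 := by omega
      rw [← this, pow_add]; norm_num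
    omega
  · -- m < 2^(L+8)  from m/256 < 2^L
    have : m < 2 ^ L * 256 := (Nat.div_lt_iff_lt_mul (by norm_num)).mp hu
    have he : 2 ^ L * 256 = 2 ^ (L + 8) := by rw [pow_add]; norm_num
    omega

lemma loop_eq (m : Nat) : 0 < m → ∀ r : List Char,
    asn1Loop m r = toBytesBE ((PySem.Int.bitLength (m : Int) + 7) / 8) m ++ r := by
  induction m using Nat.strong_induction_on with
  | _ m ih =>
    intro hm r
    rw [asn1Loop, dif_pos hm]
    by_cases h : 256 ≤ m
    · have h1 : 0 < m / 256 := Nat.div_pos h (by norm_num)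
      rw [ih (m / 256) (Nat.div_lt_self hm (by norm_num)) h1 (Char.ofNat (m % 256) :: r)]
      have hstep := bitLength_step m h
      have hc : (PySem.Int.bitLength (m : Int) + 7) / 8
          = (PySem.Int.bitLength ((m / 256 : Nat) : Int) + 7) / 8 + 1 := by omega
      rw [hc, toBytesBE]
      simp
    · have hml : m / 256 = 0 := Nat.div_eq_of_lt (by omega)
      rw [bitLength_small m hm (by omega), hml, asn1Loop]
      simp [toBytesBE]

lemma toNat_cast (n : Int) (hn : 0 ≤ n) : ((n.toNat : Nat) : Int) = n := Int.toNat_of_nonneg hn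

-- ===== VERDICT (by name: the statement is the Claim_ definition above) =====
theorem asn1_length_spec : Claim_equal_asn1_length := by
  intro n _ hpre
  unfold Spec_asn1_length asn1_length asn1_length_alt
  by_cases h : n < 0x7f
  · simp [h]
  · rw [if_neg h, if_neg h]
    have hm : 0 < n.toNat := by omega
    rw [loop_eq n.toNat hm []]
    rw [toNat_cast n hpre]
    simp
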